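-- pv_equiv track=rewrite | github.com/khakaa/algorithm-study | ikjun/프로그래머스/lv2/86971. 전력망을 둘로 나누기/전력망을 둘로 나누기.py | bfs
-- ===== SOURCE A (Python) =====
-- from collections import deque
--
-- def bfs(start, tree, visited, wire, connect):
--     queue = deque()
--     queue.append([start, tree, visited, wire])
--     visited[start] = True
--
--     while queue:
--         start, tree, visited, wire = queue.popleft()
--         connect += 1
--
--         for i in tree[start]:
--             # 시작점과 추가할 지점이 전선 정보로 연결되지 않았을 때 queue에 추가
--             if not ((start == wire[0] and i == wire[1]) or (start == wire[1] and i == wire[0])):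
--                 if not visited[i]:
--                     visited[i] = True
--                     queue.append([i, tree, visited, wire])
--
--     return connect
-- ===== SOURCE B (Python) =====
-- def bfs(start, tree, visited, wire, connect):
--     # round-based saturation: grow the component list to a fixed point, then
--     # mark visited and count by the component's size (no queue, no per-node counter)
--     comp = [start]
--     changed = True
--     while changed:
--         changed = False
--         for u in list(comp):
--             for i in tree[u]:
--                 if (u == wire[0] and i == wire[1]) or (u == wire[1] and i == wire[0]):
--                     continue
--                 if i not in comp and not visited[i]:
--                     comp.append(i)
--                     changed = True
--     for u in comp:
--         visited[u] = True
--     return connect + len(comp)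
-- ===== Notes on version B (the rewrite author's own statement) =====
-- stated objective: alternative
-- what changed: Replaces the deque-driven BFS with a round-based fixed-point saturation: a component list is grown by repeated full passes (with a changed flag) until closed under non-wire edges into unvisited nodes, and the answer is connect plus the component's length instead of a per-dequeue counter.
import Mathlib
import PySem

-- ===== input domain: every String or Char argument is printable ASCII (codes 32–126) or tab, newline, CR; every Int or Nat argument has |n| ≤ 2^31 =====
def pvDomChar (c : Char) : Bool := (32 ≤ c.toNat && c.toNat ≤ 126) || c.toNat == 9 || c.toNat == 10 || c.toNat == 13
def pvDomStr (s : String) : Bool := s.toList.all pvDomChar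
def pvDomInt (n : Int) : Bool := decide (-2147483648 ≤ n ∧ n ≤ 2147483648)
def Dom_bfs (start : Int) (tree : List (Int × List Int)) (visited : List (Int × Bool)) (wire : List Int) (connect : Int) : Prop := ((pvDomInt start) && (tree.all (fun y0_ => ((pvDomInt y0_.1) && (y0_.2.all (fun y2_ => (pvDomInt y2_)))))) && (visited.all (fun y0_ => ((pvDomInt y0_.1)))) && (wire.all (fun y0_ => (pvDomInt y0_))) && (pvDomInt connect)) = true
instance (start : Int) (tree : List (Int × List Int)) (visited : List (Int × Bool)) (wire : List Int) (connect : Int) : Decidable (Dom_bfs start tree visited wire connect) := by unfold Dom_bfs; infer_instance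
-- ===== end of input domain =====

-- B replaces A's deque-BFS by a round-based fixed-point saturation of a component list and returns
-- connect + the component's length; both Pythons leave `visited` in the same final state, and the
-- equivalence proved here is about the return value.

-- ===== PORT A =====
-- Loop state is (queue, visited, connect); the helper returns the final (visited, connect) pair and
-- bfs projects connect (Python mutates `visited` in place).  fuel = visited.length + 1 bounds the
-- number of while-iterations (every enqueue after the first flips one False entry of visited to True),
-- so the fuel-0 branch is never reached on Pre_ inputs.
def bfsLoop (t : PySem.Dict Int (List Int)) (w0 w1 : Int) :
    Nat → List Int → PySem.Dict Int Bool → Int → PySem.Dict Int Bool × Int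
  | 0, _, v, connect => (v, connect)
  | _ + 1, [], v, connect => (v, connect)
  | fuel + 1, u :: rest, v, connect =>
      -- for i in tree[start]: if not blocked-by-wire and not visited[i]: mark and enqueue
      let s := ((t.get? u).getD []).foldl
        (fun (s : List Int × PySem.Dict Int Bool) i =>
          if !((u == w0 && i == w1) || (u == w1 && i == w0)) then
            if s.2.getD i true = false then (s.1 ++ [i], s.2.insert i true) else s
          else s)
        (rest, v)
      bfsLoop t w0 w1 fuel s.1 s.2 (connect + 1)

def bfs (start : Int) (tree : List (Int × List Int)) (visited : List (Int × Bool)) (wire : List Int) (connect : Int) : Int :=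
  -- wire[0] / wire[1]: wire is never written, so the two lookups are hoisted (Pre_ gives them a value)
  let w0 := (PySem.List.pyGet? wire 0).getD 0
  let w1 := (PySem.List.pyGet? wire 1).getD 0
  (bfsLoop (PySem.Dict.mk tree) w0 w1 (visited.length + 1) [start]
    ((PySem.Dict.mk visited).insert start true) connect).2

-- ===== PORT B =====
-- Source B: comp = [start]; while changed: one full pass over a snapshot of comp, appending every
-- unblocked, unvisited, not-yet-member neighbour (setting the changed flag); answer is
-- connect + len(comp).  satPass is one u of the "for u in list(comp)" pass (state = (comp, changed));
-- fuel = visited.length + 2 bounds the number of while-rounds (each non-final round appends at least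
-- one node and comp can never exceed visited.length + 2 distinct members), so the fuel-0 branch is
-- never reached on Pre_ inputs.
def satPass (t : PySem.Dict Int (List Int)) (vd : PySem.Dict Int Bool) (w0 w1 : Int)
    (s : List Int × Bool) (u : Int) : List Int × Bool :=
  ((t.get? u).getD []).foldl
    (fun (s : List Int × Bool) i =>
      if (u == w0 && i == w1) || (u == w1 && i == w0) then s
      else if !s.1.contains i && (vd.getD i true == false) then (s.1 ++ [i], true)
      else s) s

def satLoop (t : PySem.Dict Int (List Int)) (vd : PySem.Dict Int Bool) (w0 w1 : Int) :
    Nat → List Int → List Int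
  | 0, comp => comp
  | fuel + 1, comp =>
      let s := comp.foldl (satPass t vd w0 w1) (comp, false)
      if s.2 then satLoop t vd w0 w1 fuel s.1 else s.1

def bfs_alt (start : Int) (tree : List (Int × List Int)) (visited : List (Int × Bool)) (wire : List Int) (connect : Int) : Int :=
  let w0 := (PySem.List.pyGet? wire 0).getD 0
  let w1 := (PySem.List.pyGet? wire 1).getD 0
  connect + ((satLoop (PySem.Dict.mk tree) (PySem.Dict.mk visited) w0 w1
    (visited.length + 2) [start]).length : Int)

-- ===== PRECONDITION & SPEC =====
-- Helpers for Pre_: the set of nodes A's traversal actually processes, as a saturating closure on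
-- the INPUT graph (start, plus nodes repeatedly reachable over non-wire edges into initially
-- unvisited nodes); Pre_ constrains exactly those nodes.
def pvBlocked (w0 w1 u i : Int) : Bool := (u == w0 && i == w1) || (u == w1 && i == w0)

def pvCand (tree : List (Int × List Int)) (v0 : PySem.Dict Int Bool) (w0 w1 : Int) (S : List Int) : List Int :=
  S.flatMap (fun u => (((PySem.Dict.mk tree).get? u).getD []).filter
    (fun i => !pvBlocked w0 w1 u i && (v0.getD i true == false)))

def pvReachAux (tree : List (Int × List Int)) (v0 : PySem.Dict Int Bool) (w0 w1 : Int) : Nat → List Int → List Int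
  | 0, S => S
  | n + 1, S => pvReachAux tree v0 w0 w1 n (PySem.Set.update S (pvCand tree v0 w0 w1 S))

-- visited-with-start-marked: A sets visited[start] = True before the loop, so lookups see it
def pvReach (start : Int) (tree : List (Int × List Int)) (visited : List (Int × Bool)) (w0 w1 : Int) : List Int :=
  pvReachAux tree ((PySem.Dict.mk visited).insert start true) w0 w1 (visited.length + 1) [start]

-- Pre_ excludes exactly the inputs on which Python A raises: KeyError when a processed node is not a
-- key of tree or an unblocked neighbour of a processed node is not a key of visited, IndexError on
-- wire[0]/wire[1] when wire has < 2 entries and start has a neighbour list to scan (a neighbour equal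
-- to start never raises, since A sets visited[start] = True first); tree and visited
-- are Python dicts, so their keys are additionally required to be unique (a Python dict cannot carry
-- duplicate keys, so this excludes no input the Python function can receive).
def Pre_bfs (start : Int) (tree : List (Int × List Int)) (visited : List (Int × Bool)) (wire : List Int) (connect : Int) : Prop :=
  (tree.map Prod.fst).Nodup ∧ (visited.map Prod.fst).Nodup ∧ start ∈ tree.map Prod.fst ∧
  ((2 ≤ wire.length ∧
      (∀ u ∈ pvReach start tree visited ((PySem.List.pyGet? wire 0).getD 0) ((PySem.List.pyGet? wire 1).getD 0),
        u ∈ tree.map Prod.fst ∧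
        ∀ i ∈ ((PySem.Dict.mk tree).get? u).getD [],
          pvBlocked ((PySem.List.pyGet? wire 0).getD 0) ((PySem.List.pyGet? wire 1).getD 0) u i = false →
            i ∈ visited.map Prod.fst ∨ i = start))
    ∨ (wire.length < 2 ∧ ((PySem.Dict.mk tree).get? start).getD [] = []))
instance (start : Int) (tree : List (Int × List Int)) (visited : List (Int × Bool)) (wire : List Int) (connect : Int) : Decidable (Pre_bfs start tree visited wire connect) := by unfold Pre_bfs; infer_instance

def pvWitness_bfs : Int × (List (Int × List Int)) × (List (Int × Bool)) × List Int × Int :=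
  (0, [(0, [1]), (1, [0])], [(0, false), (1, false)], [0, 1], 0)

def Spec_bfs (start : Int) (tree : List (Int × List Int)) (visited : List (Int × Bool)) (wire : List Int) (connect : Int) (out : Int) : Prop := out = bfs_alt start tree visited wire connect
instance (start : Int) (tree : List (Int × List Int)) (visited : List (Int × Bool)) (wire : List Int) (connect : Int) (out : Int) : Decidable (Spec_bfs start tree visited wire connect out) := by unfold Spec_bfs; infer_instance

-- ===== CLAIM (what is proved, stated in full; the proofs are below) =====
def Claim_equal_bfs : Prop := ∀ (start : Int) (tree : List (Int × List Int)) (visited : List (Int × Bool)) (wire : List Int) (connect : Int), Dom_bfs start tree visited wire connect → Pre_bfs start tree visited wire connect → Spec_bfs start tree visited wire connect (bfs start tree visited wire connect)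

-- ===== LEMMAS AND PROOFS =====

-- The traversal graph: neighbours of u not blocked by the excluded wire edge.
def nbrF (t : PySem.Dict Int (List Int)) (w0 w1 u : Int) : List Int :=
  ((t.get? u).getD []).filter (fun i => !((u == w0 && i == w1) || (u == w1 && i == w0)))

-- "k is an unvisited (open) node of v"
def opP (v : PySem.Dict Int Bool) (k : Int) : Prop := v.get? k = some false

-- number of False entries of the visited dict
def fc (v : PySem.Dict Int Bool) : Nat := v.items.countP (fun p => p.2 == false)

def markList (v : PySem.Dict Int Bool) (N : List Int) : PySem.Dict Int Bool :=
  N.foldl (fun v i => v.insert i true) v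

-- the nodes a BFS step enqueues from neighbour list A at visited-state v, in order
def newL (v : PySem.Dict Int Bool) : List Int → List Int
  | [] => []
  | i :: A => if v.getD i true = false then i :: newL (v.insert i true) A else newL v A

-- reachability through open nodes: roots that are open, then edges into open nodes
inductive Rch (nbr : Int → List Int) (op : Int → Prop) (roots : List Int) : Int → Prop
  | root (x : Int) : x ∈ roots → op x → Rch nbr op roots x
  | step (j i : Int) : Rch nbr op roots j → i ∈ nbr j → op i → Rch nbr op roots i

theorem rch_op (nbr : Int → List Int) (op : Int → Prop) (roots : List Int) (x : Int)
    (h : Rch nbr op roots x) : op x := by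
  induction h with
  | root _ _ h => exact h
  | step _ _ _ _ h => exact h

theorem rch_nil (nbr : Int → List Int) (op : Int → Prop) (x : Int) : ¬ Rch nbr op [] x := by
  intro h; induction h with
  | root y hm _ => simp at hm
  | step _ _ _ _ _ ih => exact ih

theorem rch_mono (nbr : Int → List Int) (op op' : Int → Prop) (r r' : List Int)
    (hop : ∀ k, op k → op' k) (hr : ∀ k, k ∈ r → k ∈ r') (x : Int)
    (h : Rch nbr op r x) : Rch nbr op' r' x := by
  induction h with
  | root y hm hy => exact .root y (hr _ hm) (hop _ hy)
  | step j i _ hn hi ih => exact .step j i ih hn (hop _ hi)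

theorem rch_congr (nbr : Int → List Int) (op op' : Int → Prop) (r r' : List Int)
    (hop : ∀ k, op k ↔ op' k) (hr : ∀ k, k ∈ r ↔ k ∈ r') (x : Int) :
    Rch nbr op r x ↔ Rch nbr op' r' x :=
  ⟨rch_mono nbr op op' r r' (fun k h => (hop k).1 h) (fun k h => (hr k).1 h) x,
   rch_mono nbr op' op r' r (fun k h => (hop k).2 h) (fun k h => (hr k).2 h) x⟩

theorem rch_layer (nbr : Int → List Int) (op op' : Int → Prop) (A R N : List Int)
    (hN : ∀ k, k ∈ N ↔ (k ∈ A ∧ op k)) (hop' : ∀ k, op' k ↔ (op k ∧ k ∉ N)) (x : Int) :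
    Rch nbr op (A ++ R) x ↔ (x ∈ N ∨ Rch nbr op' (R ++ N.flatMap nbr) x) := by
  constructor
  · intro h; induction h with
    | root y hm hy =>
      rcases List.mem_append.1 hm with h | h
      · exact Or.inl ((hN y).2 ⟨h, hy⟩)
      · by_cases hy' : y ∈ N
        · exact Or.inl hy'
        · exact Or.inr (.root y (List.mem_append_left _ h) ((hop' y).2 ⟨hy, hy'⟩))
    | step j i _ hn hi ih =>
      by_cases hiN : i ∈ N
      · exact Or.inl hiN
      · refine Or.inr ?_
        rcases ih with hjN | hR
        · exact .root i (List.mem_append_right _ (List.mem_flatMap.2 ⟨j, hjN, hn⟩))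
            ((hop' i).2 ⟨hi, hiN⟩)
        · exact .step j i hR hn ((hop' i).2 ⟨hi, hiN⟩)
  · intro h
    rcases h with hxN | h
    · rcases (hN x).1 hxN with ⟨hA, hx⟩
      exact .root x (List.mem_append_left _ hA) hx
    · induction h with
      | root y hm hy =>
        rcases List.mem_append.1 hm with h | h
        · exact .root y (List.mem_append_right _ h) ((hop' y).1 hy).1
        · rcases List.mem_flatMap.1 h with ⟨a, haN, hy'⟩
          rcases (hN a).1 haN with ⟨haA, hopa⟩
          exact .step a y (.root a (List.mem_append_left _ haA) hopa) hy' ((hop' y).1 hy).1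
      | step j i _ hn hi ih => exact .step j i ih hn ((hop' i).1 hi).1

-- dict-level facts
theorem opP_iff_getD (v : PySem.Dict Int Bool) (k : Int) :
    (v.getD k true = false) ↔ opP v k := by
  unfold opP
  rw [PySem.Dict.getD_eq_get?_getD]
  cases h : v.get? k <;> simp

theorem opP_insert (v : PySem.Dict Int Bool) (i k : Int) :
    opP (v.insert i true) k ↔ (opP v k ∧ k ≠ i) := by
  unfold opP
  rw [PySem.Dict.get?_insert]
  split_ifs with h
  · subst h; simp
  · simp [h]

theorem opP_contains (v : PySem.Dict Int Bool) (k : Int) (h : opP v k) :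
    v.contains k = true := by
  rw [PySem.Dict.contains_eq_isSome_get?, h]; rfl

theorem countP_flip (l : List (Int × Bool)) (i : Int) (hnd : (l.map Prod.fst).Nodup)
    (hmem : (i, false) ∈ l) :
    (l.map (fun p => if p.1 == i then (i, true) else p)).countP (fun p => p.2 == false) + 1
      = l.countP (fun p => p.2 == false) := by
  induction l with
  | nil => simp at hmem
  | cons p tl ih =>
    simp only [List.map_cons, List.nodup_cons] at hnd
    obtain ⟨hh, htlnd⟩ := hnd
    by_cases hpi : p.1 = i
    · have hinotin : i ∉ tl.map Prod.fst := hpi ▸ hh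
      have hp : p = (i, false) := by
        rcases List.mem_cons.1 hmem with h | h
        · exact h.symm
        · exact absurd (List.mem_map.2 ⟨(i, false), h, rfl⟩) hinotin
      have htl : tl.map (fun q => if q.1 == i then (i, true) else q) = tl := by
        have h1 : tl.map (fun q => if q.1 == i then (i, true) else q)
            = tl.map (fun q => q) := by
          apply List.map_congr_left
          intro q hq
          have hq1 : (q.1 == i) = false := by
            simp only [beq_eq_false_iff_ne, ne_eq]
            intro hqi
            exact hinotin (List.mem_map.2 ⟨q, hq, hqi⟩)
          rw [hq1]
          rfl
        simpa using h1
      rw [List.map_cons, htl, List.countP_cons, List.countP_cons, hp]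
      simp
    · have hmem' : (i, false) ∈ tl := by
        rcases List.mem_cons.1 hmem with h | h
        · exact absurd (by rw [← h]) hpi
        · exact h
      have hrec := ih htlnd hmem'
      have hq1 : (p.1 == i) = false := by simpa using hpi
      rw [List.map_cons, List.countP_cons, List.countP_cons, hq1]
      simp only [Bool.false_eq_true, if_false]
      omega

theorem fc_insert (v : PySem.Dict Int Bool) (i : Int) (h : opP v i) (hnd : v.keys.Nodup) :
    fc (v.insert i true) + 1 = fc v := by
  unfold fc
  rw [PySem.Dict.items_insert_of_contains v true (opP_contains v i h)]
  exact countP_flip v.items i (by simpa [PySem.Dict.keys] using hnd)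
    (PySem.Dict.mem_items_of_get?_eq_some v h)

theorem get?_markList (N : List Int) (v : PySem.Dict Int Bool) (k : Int) :
    (markList v N).get? k = if k ∈ N then some true else v.get? k := by
  induction N generalizing v with
  | nil => simp [markList]
  | cons i N' ih =>
    show (markList (v.insert i true) N').get? k = _
    rw [ih]
    by_cases h1 : k ∈ N'
    · simp [h1]
    · by_cases h2 : k = i
      · subst h2; simp [h1, PySem.Dict.get?_insert_self]
      · simp [h1, h2, PySem.Dict.get?_insert_of_ne _ _ h2]

theorem keys_markList (N : List Int) (v : PySem.Dict Int Bool)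
    (h : ∀ k ∈ N, v.contains k = true) : (markList v N).keys = v.keys := by
  induction N generalizing v with
  | nil => rfl
  | cons i N' ih =>
    show (markList (v.insert i true) N').keys = v.keys
    rw [ih _ (fun k hk => by
      rw [PySem.Dict.contains_insert]
      simp [h k (List.mem_cons_of_mem _ hk)])]
    exact PySem.Dict.keys_insert_of_contains v true (h i (List.mem_cons_self ..))

theorem opP_markList (N : List Int) (v : PySem.Dict Int Bool) (k : Int) :
    opP (markList v N) k ↔ (opP v k ∧ k ∉ N) := by
  unfold opP
  rw [get?_markList]
  by_cases h : k ∈ N <;> simp [h]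

def qStep : (List Int × PySem.Dict Int Bool) → Int → (List Int × PySem.Dict Int Bool) :=
  fun s i => if s.2.getD i true = false then (s.1 ++ [i], s.2.insert i true) else s

theorem foldq (A : List Int) (q : List Int) (v : PySem.Dict Int Bool) :
    A.foldl qStep (q, v) = (q ++ newL v A, markList v (newL v A)) := by
  induction A generalizing q v with
  | nil => simp [newL, markList]
  | cons i A' ih =>
    rw [List.foldl_cons]
    simp only [newL]
    by_cases h : v.getD i true = false
    · rw [if_pos h, show qStep (q, v) i = (q ++ [i], v.insert i true) by simp [qStep, h], ih]
      show _ = (q ++ (i :: newL (v.insert i true) A'),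
        markList (v.insert i true) (newL (v.insert i true) A'))
      simp
    · rw [if_neg h, show qStep (q, v) i = (q, v) by simp [qStep, h], ih]

theorem mem_newL (A : List Int) (v : PySem.Dict Int Bool) (k : Int) :
    k ∈ newL v A ↔ (k ∈ A ∧ opP v k) := by
  induction A generalizing v with
  | nil => simp [newL]
  | cons i A' ih =>
    simp only [newL]
    by_cases h : v.getD i true = false
    · have hop : opP v i := (opP_iff_getD v i).1 h
      rw [if_pos h, List.mem_cons, ih, List.mem_cons]
      constructor
      · rintro (rfl | ⟨hA, hk⟩)
        · exact ⟨Or.inl rfl, hop⟩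
        · exact ⟨Or.inr hA, ((opP_insert v i k).1 hk).1⟩
      · rintro ⟨(rfl | hA), hk⟩
        · exact Or.inl rfl
        · by_cases hki : k = i
          · exact Or.inl hki
          · exact Or.inr ⟨hA, (opP_insert v i k).2 ⟨hk, hki⟩⟩
    · have hop : ¬ opP v i := fun hc => h ((opP_iff_getD v i).2 hc)
      rw [if_neg h, ih, List.mem_cons]
      constructor
      · rintro ⟨hA, hk⟩; exact ⟨Or.inr hA, hk⟩
      · rintro ⟨(rfl | hA), hk⟩
        · exact absurd hk hop
        · exact ⟨hA, hk⟩

theorem fc_newL (A : List Int) (v : PySem.Dict Int Bool) (hnd : v.keys.Nodup) :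
    fc (markList v (newL v A)) + (newL v A).length = fc v := by
  induction A generalizing v with
  | nil => simp [newL, markList]
  | cons i A' ih =>
    simp only [newL]
    by_cases h : v.getD i true = false
    · have hop : opP v i := (opP_iff_getD v i).1 h
      have hkeys : (v.insert i true).keys = v.keys :=
        PySem.Dict.keys_insert_of_contains v true (opP_contains v i hop)
      have hnd' : (v.insert i true).keys.Nodup := by rw [hkeys]; exact hnd
      have h1 := ih (v.insert i true) hnd'
      have h2 := fc_insert v i hop hnd
      rw [if_pos h]
      show fc (markList (v.insert i true) (newL (v.insert i true) A'))
          + (newL (v.insert i true) A').length + 1 = fc v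
      omega
    · rw [if_neg h]
      exact ih v hnd

-- the BFS step in closed form
theorem bfsLoop_succ_cons (t : PySem.Dict Int (List Int)) (w0 w1 : Int) (fuel : Nat)
    (u : Int) (rest : List Int) (v : PySem.Dict Int Bool) (c : Int) :
    bfsLoop t w0 w1 (fuel + 1) (u :: rest) v c
      = bfsLoop t w0 w1 fuel (rest ++ newL v (nbrF t w0 w1 u))
          (markList v (newL v (nbrF t w0 w1 u))) (c + 1) := by
  show bfsLoop t w0 w1 fuel
      (((t.get? u).getD []).foldl
        (fun (s : List Int × PySem.Dict Int Bool) i =>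
          if !((u == w0 && i == w1) || (u == w1 && i == w0)) then
            if s.2.getD i true = false then (s.1 ++ [i], s.2.insert i true) else s
          else s) (rest, v)).1
      (((t.get? u).getD []).foldl
        (fun (s : List Int × PySem.Dict Int Bool) i =>
          if !((u == w0 && i == w1) || (u == w1 && i == w0)) then
            if s.2.getD i true = false then (s.1 ++ [i], s.2.insert i true) else s
          else s) (rest, v)).2 (c + 1) = _
  rw [show (fun (s : List Int × PySem.Dict Int Bool) i =>
          if !((u == w0 && i == w1) || (u == w1 && i == w0)) then
            if s.2.getD i true = false then (s.1 ++ [i], s.2.insert i true) else s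
          else s) = (fun s i => if (!((u == w0 && i == w1) || (u == w1 && i == w0))) = true then qStep s i else s) by
    funext s i; rfl]
  rw [PySem.List.foldl_if_eq_foldl_filter]
  rw [show ((t.get? u).getD []).filter (fun i => !((u == w0 && i == w1) || (u == w1 && i == w0))) = nbrF t w0 w1 u from rfl]
  rw [foldq]

-- main characterization of the BFS loop
theorem bfs_char (t : PySem.Dict Int (List Int)) (w0 w1 : Int) :
    ∀ (fuel : Nat) (Q : List Int) (v : PySem.Dict Int Bool) (c : Int),
      v.keys.Nodup → (∀ q ∈ Q, ¬ opP v q) → fc v + Q.length ≤ fuel →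
      (∀ k, (Rch (nbrF t w0 w1) (opP v) (Q.flatMap (nbrF t w0 w1)) k →
               (bfsLoop t w0 w1 fuel Q v c).1.get? k = some true)
          ∧ (¬ Rch (nbrF t w0 w1) (opP v) (Q.flatMap (nbrF t w0 w1)) k →
               (bfsLoop t w0 w1 fuel Q v c).1.get? k = v.get? k))
      ∧ (bfsLoop t w0 w1 fuel Q v c).1.keys = v.keys
      ∧ (bfsLoop t w0 w1 fuel Q v c).2 + (fc (bfsLoop t w0 w1 fuel Q v c).1 : Int)
          = c + Q.length + (fc v : Int) := by
  intro fuel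
  induction fuel with
  | zero =>
    intro Q v c hnd hQ hfc
    have hQnil : Q = [] := by
      cases Q with
      | nil => rfl
      | cons a b => simp at hfc
    subst hQnil
    refine ⟨fun k => ⟨fun h => absurd h (by simpa using rch_nil (nbrF t w0 w1) (opP v) k),
      fun _ => rfl⟩, rfl, by simp [bfsLoop]⟩
  | succ fuel IH =>
    intro Q v c hnd hQ hfc
    cases Q with
    | nil =>
      refine ⟨fun k => ⟨fun h => absurd h (by simpa using rch_nil (nbrF t w0 w1) (opP v) k),
        fun _ => rfl⟩, rfl, by simp [bfsLoop]⟩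
    | cons u rest =>
      rw [bfsLoop_succ_cons]
      set N := newL v (nbrF t w0 w1 u) with hNdef
      set vN := markList v N with hvNdef
      have hNmem : ∀ k, k ∈ N ↔ (k ∈ nbrF t w0 w1 u ∧ opP v k) := mem_newL _ v
      have hNcont : ∀ k ∈ N, v.contains k = true := fun k hk =>
        opP_contains v k ((hNmem k).1 hk).2
      have hkeysN : vN.keys = v.keys := keys_markList N v hNcont
      have hndN : vN.keys.Nodup := by rw [hkeysN]; exact hnd
      have hfcN : fc vN + N.length = fc v := fc_newL _ v hnd
      have hopN : ∀ k, opP vN k ↔ (opP v k ∧ k ∉ N) := opP_markList N v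
      have hQ' : ∀ q ∈ rest ++ N, ¬ opP vN q := by
        intro q hq hopq
        rcases List.mem_append.1 hq with h | h
        · exact hQ q (List.mem_cons_of_mem _ h) ((hopN q).1 hopq).1
        · exact ((hopN q).1 hopq).2 h
      have hfuel' : fc vN + (rest ++ N).length ≤ fuel := by
        simp only [List.length_append]
        simp only [List.length_cons] at hfc
        omega
      obtain ⟨hchar, hkeys, hcnt⟩ := IH (rest ++ N) vN (c + 1) hndN hQ' hfuel'
      have hiff : ∀ k, Rch (nbrF t w0 w1) (opP v) ((u :: rest).flatMap (nbrF t w0 w1)) k ↔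
          (k ∈ N ∨ Rch (nbrF t w0 w1) (opP vN) ((rest ++ N).flatMap (nbrF t w0 w1)) k) := by
        intro k
        rw [List.flatMap_cons, List.flatMap_append]
        exact rch_layer (nbrF t w0 w1) (opP v) (opP vN) (nbrF t w0 w1 u)
          (rest.flatMap (nbrF t w0 w1)) N hNmem hopN k
      refine ⟨fun k => ⟨?_, ?_⟩, by rw [hkeys, hkeysN], ?_⟩
      · intro hR
        rcases (hiff k).1 hR with hN | hR'
        · by_cases hR' : Rch (nbrF t w0 w1) (opP vN) ((rest ++ N).flatMap (nbrF t w0 w1)) k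
          · exact (hchar k).1 hR'
          · rw [(hchar k).2 hR', get?_markList, if_pos hN]
        · exact (hchar k).1 hR'
      · intro hnR
        rw [hiff] at hnR
        push_neg at hnR
        rw [(hchar k).2 hnR.2, get?_markList, if_neg hnR.1]
      · simp only [List.length_append] at hcnt
        simp only [List.length_cons]
        push_cast at hcnt ⊢
        omega

theorem fc_insert_true_le (visited : List (Int × Bool)) (s : Int) :
    fc ((PySem.Dict.mk visited).insert s true) ≤ visited.length := by
  unfold fc
  by_cases h : (PySem.Dict.mk visited).contains s = true
  · rw [PySem.Dict.items_insert_of_contains (PySem.Dict.mk visited) true h]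
    calc ((PySem.Dict.mk visited).items.map fun p => if p.1 == s then (s, true) else p).countP
          (fun p => p.2 == false)
        ≤ ((PySem.Dict.mk visited).items.map fun p => if p.1 == s then (s, true) else p).length :=
          List.countP_le_length
      _ = visited.length := by simp
  · have hc : (PySem.Dict.mk visited).contains s = false := by
      rwa [Bool.not_eq_true] at h
    rw [PySem.Dict.items_insert_of_not_contains (PySem.Dict.mk visited) true hc]
    rw [List.countP_append]
    have h1 : (PySem.Dict.mk visited).items.countP (fun p => p.2 == false) ≤ visited.length := by
      calc (PySem.Dict.mk visited).items.countP (fun p => p.2 == false)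
          ≤ (PySem.Dict.mk visited).items.length := List.countP_le_length
        _ = visited.length := by simp
    have h2 : List.countP (fun p : Int × Bool => p.2 == false) [(s, true)] = 0 := by simp
    rw [h2]
    omega

-- ========== B-side lemmas: the saturation loop ==========

-- the inner neighbour step of satPass once the blocked-wire test is filtered away
def bStep (vd : PySem.Dict Int Bool) : (List Int × Bool) → Int → (List Int × Bool) :=
  fun s i => if !s.1.contains i && (vd.getD i true == false) then (s.1 ++ [i], true) else s

theorem satPass_eq (t : PySem.Dict Int (List Int)) (vd : PySem.Dict Int Bool) (w0 w1 : Int)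
    (s : List Int × Bool) (u : Int) :
    satPass t vd w0 w1 s u = (nbrF t w0 w1 u).foldl (bStep vd) s := by
  show ((t.get? u).getD []).foldl
      (fun (s : List Int × Bool) i =>
        if (u == w0 && i == w1) || (u == w1 && i == w0) then s
        else if !s.1.contains i && (vd.getD i true == false) then (s.1 ++ [i], true)
        else s) s = _
  rw [show (fun (s : List Int × Bool) i =>
        if (u == w0 && i == w1) || (u == w1 && i == w0) then s
        else if !s.1.contains i && (vd.getD i true == false) then (s.1 ++ [i], true)
        else s) = (fun s i => if (!((u == w0 && i == w1) || (u == w1 && i == w0))) = true then bStep vd s i else s) by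
    funext s i
    cases h : ((u == w0 && i == w1) || (u == w1 && i == w0)) <;> simp [h, bStep]]
  rw [PySem.List.foldl_if_eq_foldl_filter]
  rfl

-- combined invariants of one inner neighbour fold
theorem fold_bStep_inv (vd : PySem.Dict Int Bool) (A : List Int) (s : List Int × Bool) :
    (∀ k ∈ s.1, k ∈ (A.foldl (bStep vd) s).1)
    ∧ (s.2 = true → (A.foldl (bStep vd) s).2 = true)
    ∧ (s.1.Nodup → (A.foldl (bStep vd) s).1.Nodup)
    ∧ (∀ k ∈ (A.foldl (bStep vd) s).1,
        k ∈ s.1 ∨ (k ∈ A ∧ (vd.getD k true == false) = true))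
    ∧ s.1.length ≤ (A.foldl (bStep vd) s).1.length
    ∧ ((A.foldl (bStep vd) s).2 = true → s.2 = true ∨ s.1.length < (A.foldl (bStep vd) s).1.length) := by
  induction A generalizing s with
  | nil => exact ⟨fun k hk => hk, fun h => h, fun h => h, fun k hk => Or.inl hk,
      le_refl _, fun h => Or.inl h⟩
  | cons i A' ih =>
    rw [List.foldl_cons]
    by_cases hc : (!s.1.contains i && (vd.getD i true == false)) = true
    · have hstep : bStep vd s i = (s.1 ++ [i], true) := by
        unfold bStep; rw [if_pos hc]
      rw [hstep]
      obtain ⟨hgrow, hmono, hnd, hprov, hlen, hflag⟩ := ih (s.1 ++ [i], true)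
      have hni : i ∉ s.1 := by
        rcases Bool.and_eq_true_iff.1 hc with ⟨h1, _⟩
        intro hmem
        rw [List.contains_iff_mem.2 hmem] at h1
        exact Bool.noConfusion h1
      refine ⟨fun k hk => hgrow k (by simp [hk]), fun _ => hmono rfl, ?_, ?_, ?_, ?_⟩
      · intro hnds
        refine hnd (by
          simp [List.nodup_append, hnds]
          exact fun a ha he => hni (he ▸ ha))
      · intro k hk
        rcases hprov k hk with hk' | ⟨hA, hv⟩
        · rcases List.mem_append.1 hk' with h | h
          · exact Or.inl h
          · refine Or.inr ⟨by simp at h; simp [h], ?_⟩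
            simp at h; subst h
            exact Bool.and_eq_true_iff.1 hc |>.2
        · exact Or.inr ⟨List.mem_cons_of_mem _ hA, hv⟩
      · have : (s.1 ++ [i]).length ≤ _ := hlen
        simp at this
        omega
      · intro _
        right
        have : (s.1 ++ [i]).length ≤ _ := hlen
        simp at this
        omega
    · have hstep : bStep vd s i = s := by simp only [bStep]; rw [if_neg (by simpa using hc)]
      rw [hstep]
      obtain ⟨hgrow, hmono, hnd, hprov, hlen, hflag⟩ := ih s
      exact ⟨hgrow, hmono, hnd, fun k hk => (hprov k hk).imp id (fun ⟨hA, hv⟩ => ⟨List.mem_cons_of_mem _ hA, hv⟩),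
        hlen, hflag⟩

-- if the flag stays false the fold changed nothing and every unvisited neighbour was already a member
theorem fold_bStep_fix (vd : PySem.Dict Int Bool) (A : List Int) (s : List Int × Bool)
    (h : (A.foldl (bStep vd) s).2 = false) :
    (A.foldl (bStep vd) s).1 = s.1 ∧ s.2 = false
    ∧ ∀ i ∈ A, (vd.getD i true == false) = true → s.1.contains i = true := by
  induction A generalizing s with
  | nil => exact ⟨rfl, h, by simp⟩
  | cons i A' ih =>
    rw [List.foldl_cons] at h ⊢
    by_cases hc : (!s.1.contains i && (vd.getD i true == false)) = true
    · exfalso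
      have hstep : bStep vd s i = (s.1 ++ [i], true) := by
        unfold bStep; rw [if_pos hc]
      rw [hstep] at h
      have := (fold_bStep_inv vd A' (s.1 ++ [i], true)).2.1 rfl
      rw [h] at this
      exact Bool.false_ne_true this
    · have hstep : bStep vd s i = s := by simp only [bStep]; rw [if_neg (by simpa using hc)]
      rw [hstep] at h ⊢
      obtain ⟨h1, h2, h3⟩ := ih s h
      refine ⟨h1, h2, fun j hj hv => ?_⟩
      rcases List.mem_cons.1 hj with rfl | hj'
      · by_contra hnc
        have hcf : s.1.contains j = false := by simpa using hnc
        exact hc (by rw [hcf, hv]; rfl)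
      · exact h3 j hj' hv

-- the same invariants lifted to one full pass over a snapshot list L
theorem fold_pass_inv (t : PySem.Dict Int (List Int)) (vd : PySem.Dict Int Bool) (w0 w1 : Int)
    (L : List Int) (s : List Int × Bool) :
    (∀ k ∈ s.1, k ∈ (L.foldl (satPass t vd w0 w1) s).1)
    ∧ (s.2 = true → (L.foldl (satPass t vd w0 w1) s).2 = true)
    ∧ (s.1.Nodup → (L.foldl (satPass t vd w0 w1) s).1.Nodup)
    ∧ (∀ k ∈ (L.foldl (satPass t vd w0 w1) s).1,
        k ∈ s.1 ∨ ∃ u ∈ L, k ∈ nbrF t w0 w1 u ∧ (vd.getD k true == false) = true)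
    ∧ s.1.length ≤ (L.foldl (satPass t vd w0 w1) s).1.length
    ∧ ((L.foldl (satPass t vd w0 w1) s).2 = true →
        s.2 = true ∨ s.1.length < (L.foldl (satPass t vd w0 w1) s).1.length) := by
  induction L generalizing s with
  | nil => exact ⟨fun k hk => hk, fun h => h, fun h => h, fun k hk => Or.inl hk,
      le_refl _, fun h => Or.inl h⟩
  | cons u L' ih =>
    rw [List.foldl_cons, satPass_eq]
    obtain ⟨hgrow1, hmono1, hnd1, hprov1, hlen1, hflag1⟩ := fold_bStep_inv vd (nbrF t w0 w1 u) s
    obtain ⟨hgrow2, hmono2, hnd2, hprov2, hlen2, hflag2⟩ := ih ((nbrF t w0 w1 u).foldl (bStep vd) s)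
    refine ⟨fun k hk => hgrow2 k (hgrow1 k hk), fun h => hmono2 (hmono1 h), fun h => hnd2 (hnd1 h),
      ?_, le_trans hlen1 hlen2, ?_⟩
    · intro k hk
      rcases hprov2 k hk with hk' | ⟨v, hv, hkn, hvd⟩
      · rcases hprov1 k hk' with hk'' | ⟨hn, hvd⟩
        · exact Or.inl hk''
        · exact Or.inr ⟨u, List.mem_cons_self .., hn, hvd⟩
      · exact Or.inr ⟨v, List.mem_cons_of_mem _ hv, hkn, hvd⟩
    · intro h
      rcases hflag2 h with h' | h'
      · rcases hflag1 h' with h'' | h''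
        · exact Or.inl h''
        · exact Or.inr (lt_of_lt_of_le h'' hlen2)
      · exact Or.inr (lt_of_le_of_lt hlen1 h')

theorem fold_pass_fix (t : PySem.Dict Int (List Int)) (vd : PySem.Dict Int Bool) (w0 w1 : Int)
    (L : List Int) (s : List Int × Bool)
    (h : (L.foldl (satPass t vd w0 w1) s).2 = false) :
    (L.foldl (satPass t vd w0 w1) s).1 = s.1 ∧ s.2 = false
    ∧ ∀ u ∈ L, ∀ i ∈ nbrF t w0 w1 u, (vd.getD i true == false) = true → s.1.contains i = true := by
  induction L generalizing s with
  | nil => exact ⟨rfl, h, by simp⟩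
  | cons u L' ih =>
    rw [List.foldl_cons, satPass_eq] at h ⊢
    obtain ⟨h1, h2, h3⟩ := ih _ h
    obtain ⟨h1', h2', h3'⟩ := fold_bStep_fix vd (nbrF t w0 w1 u) s (by
      by_contra hne
      have : ((nbrF t w0 w1 u).foldl (bStep vd) s).2 = true := by simpa using hne
      have := (fold_pass_inv t vd w0 w1 L' _).2.1 this
      rw [h] at this
      exact Bool.false_ne_true this)
    refine ⟨by rw [h1, h1'], h2', fun v hv i hi hvd => ?_⟩
    rcases List.mem_cons.1 hv with rfl | hv'
    · exact h3' i hi hvd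
    · rw [h1'] at h3
      exact h3 v hv' i hi hvd

-- characterization of the saturation loop: given enough fuel it computes exactly
-- {start} ∪ {k reachable through open nodes from start's unblocked neighbours}, without duplicates
theorem satLoop_char (t : PySem.Dict Int (List Int)) (vd v0 : PySem.Dict Int Bool)
    (start w0 w1 : Int)
    (hv : ∀ k, k ≠ start → v0.get? k = vd.get? k) (hs : v0.get? start = some true) :
    ∀ (fuel : Nat) (comp : List Int), comp.Nodup → start ∈ comp →
      (∀ k ∈ comp, k = start ∨ Rch (nbrF t w0 w1) (opP v0) (nbrF t w0 w1 start) k) →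
      v0.keys.length + 2 ≤ fuel + comp.length →
      (satLoop t vd w0 w1 fuel comp).Nodup
      ∧ (∀ k, k ∈ satLoop t vd w0 w1 fuel comp ↔
          (k = start ∨ Rch (nbrF t w0 w1) (opP v0) (nbrF t w0 w1 start) k)) := by
  have hodiff : ∀ k, k ≠ start → ((vd.getD k true == false) = true ↔ opP v0 k) := by
    intro k hk
    rw [beq_iff_eq, opP_iff_getD]
    unfold opP
    rw [hv k hk]
  have hcompsub : ∀ comp : List Int, comp.Nodup →
      (∀ k ∈ comp, k = start ∨ Rch (nbrF t w0 w1) (opP v0) (nbrF t w0 w1 start) k) →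
      comp.length ≤ v0.keys.length + 1 := by
    intro comp hnd hsound
    have hsub : comp ⊆ start :: v0.keys := by
      intro k hk
      rcases hsound k hk with rfl | hR
      · exact List.mem_cons_self ..
      · have hop : opP v0 k := rch_op _ _ _ _ hR
        refine List.mem_cons_of_mem _ ?_
        by_contra hnk
        rw [← PySem.Dict.get?_eq_none_iff_not_mem_keys] at hnk
        unfold opP at hop
        rw [hnk] at hop
        simp at hop
    calc comp.length = comp.toFinset.card := (List.toFinset_card_of_nodup hnd).symm
      _ ≤ (start :: v0.keys).toFinset.card := Finset.card_le_card (fun x hx => by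
            rw [List.mem_toFinset] at hx ⊢
            exact hsub hx)
      _ ≤ (start :: v0.keys).length := List.toFinset_card_le _
      _ = v0.keys.length + 1 := by simp
  intro fuel
  induction fuel with
  | zero =>
    intro comp hnd hstart hsound hfuel
    exfalso
    have := hcompsub comp hnd hsound
    simp at hfuel
    omega
  | succ fuel ih =>
    intro comp hnd hstart hsound hfuel
    rw [show satLoop t vd w0 w1 (fuel + 1) comp
        = (if (comp.foldl (satPass t vd w0 w1) (comp, false)).2
            then satLoop t vd w0 w1 fuel (comp.foldl (satPass t vd w0 w1) (comp, false)).1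
            else (comp.foldl (satPass t vd w0 w1) (comp, false)).1) from rfl]
    obtain ⟨hgrow, _, hndp, hprov, hlen, hflag⟩ := fold_pass_inv t vd w0 w1 comp (comp, false)
    set s := comp.foldl (satPass t vd w0 w1) (comp, false) with hsdef
    have hsound' : ∀ k ∈ s.1, k = start ∨ Rch (nbrF t w0 w1) (opP v0) (nbrF t w0 w1 start) k := by
      intro k hk
      rcases hprov k hk with hk' | ⟨u, hu, hkn, hvd⟩
      · exact hsound k hk'
      · by_cases hks : k = start
        · exact Or.inl hks
        · have hop : opP v0 k := (hodiff k hks).1 hvd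
          rcases hsound u hu with rfl | hRu
          · exact Or.inr (.root k hkn hop)
          · exact Or.inr (.step u k hRu hkn hop)
    by_cases hch : s.2 = true
    · rw [if_pos hch]
      have hlt : comp.length < s.1.length := by
        rcases hflag hch with h | h
        · exact absurd h (by simp)
        · exact h
      exact ih s.1 (hndp hnd) (hgrow start hstart) hsound' (by omega)
    · rw [if_neg hch]
      obtain ⟨hfix, _, hclosed⟩ := fold_pass_fix t vd w0 w1 comp (comp, false) (by simpa using hch)
      rw [hfix]
      have hcomplete : ∀ k, Rch (nbrF t w0 w1) (opP v0) (nbrF t w0 w1 start) k → k ∈ comp := by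
        intro k hR
        induction hR with
        | root x hx hop =>
          have hxs : x ≠ start := by
            intro he
            unfold opP at hop
            rw [he, hs] at hop
            simp at hop
          have := hclosed start hstart x hx ((hodiff x hxs).2 hop)
          exact List.contains_iff_mem.1 this
        | step j i _ hn hop ihj =>
          have his : i ≠ start := by
            intro he
            unfold opP at hop
            rw [he, hs] at hop
            simp at hop
          have := hclosed j ihj i hn ((hodiff i his).2 hop)
          exact List.contains_iff_mem.1 this
      refine ⟨hnd, fun k => ⟨fun hk => ?_, fun hk => ?_⟩⟩
      · rw [hfix] at hsound'
        exact hsound' k hk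
      · rcases hk with rfl | hR
        · exact hstart
        · exact hcomplete k hR

-- generic counting helper: split a countP along a second Boolean test
theorem countP_split {α : Type} (l : List α) (p q : α → Bool) :
    l.countP p = l.countP (fun a => p a && q a) + l.countP (fun a => p a && !q a) := by
  induction l with
  | nil => simp
  | cons a l ih =>
    simp only [List.countP_cons]
    cases hp : p a <;> cases hq : q a <;> simp [hp, hq] <;> omega

-- ===== VERDICT (by name: the statement is the Claim_ definition above) =====
theorem bfs_spec : Claim_equal_bfs := by
  unfold Claim_equal_bfs
  intro start tree visited wire connect _ hpre
  obtain ⟨_, hndv, _, _⟩ := hpre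
  simp only [Spec_bfs, bfs, bfs_alt]
  set t := PySem.Dict.mk tree with ht
  set w0 := (PySem.List.pyGet? wire 0).getD 0 with hw0
  set w1 := (PySem.List.pyGet? wire 1).getD 0 with hw1
  set vd := PySem.Dict.mk visited with hvd
  set v0 := vd.insert start true with hv0
  have hndm : vd.keys.Nodup := by
    simpa [PySem.Dict.keys, PySem.Dict.items] using hndv
  have hnd0 : v0.keys.Nodup := PySem.Dict.nodup_keys_insert _ _ _ hndm
  have hfc0 : fc v0 ≤ visited.length := fc_insert_true_le visited start
  have hstart : ¬ opP v0 start := by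
    unfold opP
    rw [hv0, PySem.Dict.get?_insert_self]
    simp
  -- A-side: count from the BFS characterization
  obtain ⟨hcA, hkA, hcntA⟩ := bfs_char t w0 w1 (visited.length + 1) [start] v0 connect hnd0
    (by intro q hq; rw [List.mem_singleton] at hq; subst hq; exact hstart)
    (by simp; omega)
  have hrootsA : ∀ k, Rch (nbrF t w0 w1) (opP v0) ([start].flatMap (nbrF t w0 w1)) k
      ↔ Rch (nbrF t w0 w1) (opP v0) (nbrF t w0 w1 start) k := by
    intro k
    apply rch_congr
    · intro k'; exact Iff.rfl
    · intro k'; simp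
  -- B-side: the final component
  have hkeyslen : v0.keys.length ≤ visited.length + 1 := by
    by_cases hc : vd.contains start = true
    · rw [hv0, PySem.Dict.keys_insert_of_contains vd true hc]
      have : vd.keys.length = visited.length := by
        simp [PySem.Dict.keys, PySem.Dict.items, hvd]
      omega
    · have hc' : vd.contains start = false := by simpa using hc
      rw [hv0]
      unfold PySem.Dict.keys
      rw [PySem.Dict.items_insert_of_not_contains vd true hc']
      have : vd.items.length = visited.length := by simp [PySem.Dict.items, hvd]
      simp [this]
  obtain ⟨hCnd, hCmem⟩ := satLoop_char t vd v0 start w0 w1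
    (fun k hk => PySem.Dict.get?_insert_of_ne _ _ hk)
    (PySem.Dict.get?_insert_self _ _ _)
    (visited.length + 2) [start] (by simp) (by simp)
    (by intro k hk; rw [List.mem_singleton] at hk; exact Or.inl hk)
    (by simp; omega)
  set C := satLoop t vd w0 w1 (visited.length + 2) [start] with hC
  set finalA := (bfsLoop t w0 w1 (visited.length + 1) [start] v0 connect).1 with hfA
  -- express both fc's as counts over v0.keys
  have hfcv0 : fc v0 = v0.keys.countP (fun k => v0.getD k true == false) := by
    unfold fc
    rw [PySem.Dict.items_eq_map_keys v0 hnd0 true, List.countP_map]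
    rfl
  have hfcA : fc finalA = v0.keys.countP (fun k => (v0.getD k true == false) && !(C.contains k)) := by
    unfold fc
    rw [PySem.Dict.items_eq_map_keys finalA (hkA ▸ hnd0) true, List.countP_map, hkA]
    apply List.countP_congr
    intro k _
    have hbool : (finalA.getD k true == false) = ((v0.getD k true == false) && !(C.contains k)) := by
      by_cases hR : Rch (nbrF t w0 w1) (opP v0) (nbrF t w0 w1 start) k
      · have h1 : finalA.get? k = some true := (hcA k).1 ((hrootsA k).2 hR)
        have h2 : k ∈ C := (hCmem k).2 (Or.inr hR)
        have h3 : opP v0 k := rch_op _ _ _ _ hR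
        rw [PySem.Dict.getD_eq_get?_getD, h1, List.contains_iff_mem.2 h2]
        unfold opP at h3
        rw [PySem.Dict.getD_eq_get?_getD, h3]
        simp
      · have h1 : finalA.get? k = v0.get? k := (hcA k).2 (fun hc => hR ((hrootsA k).1 hc))
        rw [PySem.Dict.getD_eq_get?_getD, h1, ← PySem.Dict.getD_eq_get?_getD]
        by_cases hks : k = start
        · subst hks
          have : v0.getD k true = true := by
            rw [PySem.Dict.getD_eq_get?_getD, hv0, PySem.Dict.get?_insert_self]
            rfl
          rw [this]
          simp
        · have h2 : k ∉ C := fun hc => by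
            rcases (hCmem k).1 hc with rfl | hc'
            · exact hks rfl
            · exact hR hc'
          have : C.contains k = false := by
            rw [Bool.eq_false_iff]
            intro hc
            exact h2 (List.contains_iff_mem.1 hc)
          rw [this]
          simp
    simp only [Function.comp_apply]
    rw [show ((k, finalA.getD k true).2 == false) = (finalA.getD k true == false) from rfl, hbool]
  -- the component's length counts start plus the reachable open keys
  have hperm : (v0.keys.filter (fun k => (v0.getD k true == false) && C.contains k)).Perm
      (C.filter (fun k => !(k == start))) := by
    rw [List.perm_ext_iff_of_nodup (hnd0.filter _) (hCnd.filter _)]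
    intro k
    simp only [List.mem_filter]
    constructor
    · rintro ⟨_, hb⟩
      rcases Bool.and_eq_true_iff.1 hb with ⟨hopen, hcon⟩
      have hopk : opP v0 k := (opP_iff_getD v0 k).1 (beq_iff_eq.1 hopen)
      have hks : k ≠ start := fun he => hstart (he ▸ hopk)
      exact ⟨List.contains_iff_mem.1 hcon, by simp [hks]⟩
    · rintro ⟨hC', hns⟩
      have hks : k ≠ start := by simpa using hns
      have hR : Rch (nbrF t w0 w1) (opP v0) (nbrF t w0 w1 start) k := by
        rcases (hCmem k).1 hC' with rfl | h
        · exact absurd rfl hks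
        · exact h
      have hopk : opP v0 k := rch_op _ _ _ _ hR
      have hkey : k ∈ v0.keys := by
        by_contra hnk
        rw [← PySem.Dict.get?_eq_none_iff_not_mem_keys] at hnk
        unfold opP at hopk
        rw [hnk] at hopk
        simp at hopk
      refine ⟨hkey, ?_⟩
      rw [Bool.and_eq_true_iff]
      refine ⟨?_, List.contains_iff_mem.2 hC'⟩
      rw [beq_iff_eq]
      exact (opP_iff_getD v0 k).2 hopk
  have hClen : C.length = C.countP (fun k => !(k == start)) + 1 := by
    have hstartC : start ∈ C := (hCmem start).2 (Or.inl rfl)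
    have h1 : C.length = C.countP (fun k => k == start) + C.countP (fun k => !(k == start)) := by
      simpa [decide_not] using C.length_eq_countP_add_countP (fun k => k == start)
    have h2 : C.countP (fun k => k == start) = 1 := by
      simpa [List.count] using List.count_eq_one_of_mem hCnd hstartC
    omega
  have hsplit := countP_split v0.keys (fun k => v0.getD k true == false) (fun k => C.contains k)
  have hX : v0.keys.countP (fun k => (v0.getD k true == false) && C.contains k)
      = C.countP (fun k => !(k == start)) := by
    rw [List.countP_eq_length_filter, List.countP_eq_length_filter]
    exact hperm.length_eq
  -- assemble
  simp only [List.length_singleton] at hcntA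
  rw [hfcv0, hfcA] at hcntA
  rw [hsplit, hX] at hcntA
  push_cast at hcntA ⊢
  omega
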